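-- pv_equiv track=rewrite | github.com/catherineewu/Programming1 | rle_program.py | to_rle_string
-- ===== SOURCE A (Python) =====
-- def to_rle_string(rle_data):
--     # Translates RLE data into a human-readable representation. For each run, in order, it should display the run length
--     # in decimal (1-2 digits); the run value in hexadecimal (1 digit); and a delimiter, ‘:’, between runs.
--     # Ex: to_rle_string([15, 15, 6, 4]) yields string "15f:64".
--     readable_list = []
--     for i in range(len(rle_data)):
--         if i % 2 == 1:
--             if 0 <= rle_data[i] <= 9:
--                 readable_list.append(str(rle_data[i]))
--             else:
--                 readable_list.append(chr(rle_data[i] + 87))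
--             if i != len(rle_data) - 1:
--                 readable_list.append(':')
--         else:
--             readable_list.append(str(rle_data[i]))
--     readable_string = ''.join(readable_list)
--     return readable_string
-- ===== SOURCE B (Python) =====
-- def to_rle_string(rle_data):
--     # Build one chunk per (length, value) pair, then join with ':'.
--     chunks = []
--     for i in range(0, len(rle_data), 2):
--         chunk = str(rle_data[i])
--         if i + 1 < len(rle_data):
--             v = rle_data[i + 1]
--             chunk += str(v) if 0 <= v <= 9 else chr(v + 87)
--         chunks.append(chunk)
--     return ':'.join(chunks)
-- ===== Notes on version B (the rewrite author's own statement) =====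
-- stated objective: simpler
-- what changed: B walks the list two elements at a time building one chunk string per run and emits delimiters with a single ':'.join, instead of A's per-index parity test with inline conditional delimiter appends.
import Mathlib
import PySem

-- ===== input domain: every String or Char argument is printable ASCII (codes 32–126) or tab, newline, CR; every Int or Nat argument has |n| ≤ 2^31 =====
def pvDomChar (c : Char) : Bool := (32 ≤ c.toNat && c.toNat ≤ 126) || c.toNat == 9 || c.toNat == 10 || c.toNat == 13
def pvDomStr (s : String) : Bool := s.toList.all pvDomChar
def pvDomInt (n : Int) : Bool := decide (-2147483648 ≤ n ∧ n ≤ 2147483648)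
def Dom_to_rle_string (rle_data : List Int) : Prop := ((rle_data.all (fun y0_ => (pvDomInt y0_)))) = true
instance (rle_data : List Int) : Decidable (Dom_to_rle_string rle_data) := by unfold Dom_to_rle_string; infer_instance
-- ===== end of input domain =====

-- B builds one chunk per (run-length, value) pair and joins them with ':' in one pass, instead of A's per-index parity loop with inline delimiter appends (objective: simpler).


-- ===== PORT A =====
-- chr(v + 87): ported by hand as Char.ofNat (v + 87).toNat — exact whenever Pre_ holds
-- (v + 87 a valid non-surrogate code point; elsewhere Python raises or the result is no Lean String).
def to_rle_string (rle_data : List Int) : String :=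
  let readable_list : List String :=
    (PySem.List.pyRange 0 (rle_data.length : Int) 1).foldl
      (fun acc i =>
        if PySem.Int.mod i 2 = 1 then
          let acc :=
            if 0 ≤ PySem.List.pyGetD rle_data i 0 ∧ PySem.List.pyGetD rle_data i 0 ≤ 9 then
              acc ++ [PySem.Int.toStr (PySem.List.pyGetD rle_data i 0)]
            else
              acc ++ [String.singleton (Char.ofNat (PySem.List.pyGetD rle_data i 0 + 87).toNat)]
          if i ≠ (rle_data.length : Int) - 1 then acc ++ [":"] else acc
        else
          acc ++ [PySem.Int.toStr (PySem.List.pyGetD rle_data i 0)])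
      []
  PySem.Str.join "" readable_list

-- ===== PORT B =====
def pvChunk (n v : Int) : String :=
  PySem.Int.toStr n ++
    (if 0 ≤ v ∧ v ≤ 9 then PySem.Int.toStr v
     else String.singleton (Char.ofNat (v + 87).toNat))

def pvChunks : List Int → List String
  | [] => []
  | [n] => [PySem.Int.toStr n]
  | n :: v :: rest => pvChunk n v :: pvChunks rest

def to_rle_string_alt (rle_data : List Int) : String :=
  PySem.Str.join ":" (pvChunks rle_data)

-- ===== PRECONDITION & SPEC =====
-- Pre_ excludes inputs with an odd-index value v outside 0..9 for which chr(v+87) either raises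
-- ValueError (v+87 < 0 or ≥ 0x110000) or yields a lone UTF-16 surrogate (0xD800 ≤ v+87 ≤ 0xDFFF),
-- a string that is not representable as a Lean String.
def pvOkVal (v : Int) : Bool :=
  (0 ≤ v && v ≤ 9) ||
    (0 ≤ v + 87 && (v + 87 < 55296 || (57343 < v + 87 && v + 87 < 1114112)))

def Pre_to_rle_string (rle_data : List Int) : Prop :=
  ∀ i, (h : i < rle_data.length) → i % 2 = 1 → pvOkVal rle_data[i] = true
instance (rle_data : List Int) : Decidable (Pre_to_rle_string rle_data) := by
  unfold Pre_to_rle_string; infer_instance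

def pvWitness_to_rle_string : List Int := [15, 15, 6, 4]

def Spec_to_rle_string (rle_data : List Int) (out : String) : Prop := out = to_rle_string_alt rle_data
instance (rle_data : List Int) (out : String) : Decidable (Spec_to_rle_string rle_data out) := by unfold Spec_to_rle_string; infer_instance

-- ===== CLAIM (what is proved, stated in full; the proofs are below) =====
def Claim_equal_to_rle_string : Prop := ∀ (rle_data : List Int), Dom_to_rle_string rle_data → Pre_to_rle_string rle_data → Spec_to_rle_string rle_data (to_rle_string rle_data)

-- ===== LEMMAS AND PROOFS =====

def pvGA (l : List Int) (i : Int) : List String :=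
  if PySem.Int.mod i 2 = 1 then
    (if 0 ≤ PySem.List.pyGetD l i 0 ∧ PySem.List.pyGetD l i 0 ≤ 9 then
        [PySem.Int.toStr (PySem.List.pyGetD l i 0)]
      else
        [String.singleton (Char.ofNat (PySem.List.pyGetD l i 0 + 87).toNat)])
    ++ (if i ≠ (l.length : Int) - 1 then [":"] else [])
  else [PySem.Int.toStr (PySem.List.pyGetD l i 0)]

theorem A_eq_join (l : List Int) :
    to_rle_string l =
      PySem.Str.join "" ((PySem.List.pyRange 0 (l.length : Int) 1).flatMap (pvGA l)) := by
  unfold to_rle_string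
  have h : (fun (acc : List String) (i : Int) =>
      if PySem.Int.mod i 2 = 1 then
        let acc :=
          if 0 ≤ PySem.List.pyGetD l i 0 ∧ PySem.List.pyGetD l i 0 ≤ 9 then
            acc ++ [PySem.Int.toStr (PySem.List.pyGetD l i 0)]
          else
            acc ++ [String.singleton (Char.ofNat (PySem.List.pyGetD l i 0 + 87).toNat)]
        if i ≠ (l.length : Int) - 1 then acc ++ [":"] else acc
      else
        acc ++ [PySem.Int.toStr (PySem.List.pyGetD l i 0)]) =
      (fun acc i => acc ++ pvGA l i) := by
    funext acc i
    simp only [pvGA]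
    split_ifs <;> simp
  rw [h, PySem.List.foldl_append_eq_flatMap]
  simp
theorem pvGA_shift (a b : Int) (rest : List Int) (k : Nat) :
    pvGA (a :: b :: rest) ((2 + k : Nat) : Int) = pvGA rest (k : Int) := by
  have hm : ∀ n : Nat, PySem.Int.mod (n : Int) 2 = ((n % 2 : Nat) : Int) := fun n => by
    rw [show (2 : Int) = ((2 : Nat) : Int) from rfl, PySem.Int.mod_natCast]
  have h1 : (2 + k) % 2 = k % 2 := by omega
  have h2 : (a :: b :: rest).getD (2 + k) 0 = rest.getD k 0 := by
    rw [Nat.add_comm 2 k]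
    simp
  have h3 : (((2 + k : Nat) : Int) ≠ ((a :: b :: rest).length : Int) - 1) =
      (((k : Nat) : Int) ≠ ((rest.length : Int)) - 1) := by
    simp only [eq_iff_iff, List.length_cons]
    constructor <;> (intro h; push_cast at *; omega)
  simp only [pvGA, PySem.List.pyGetD_natCast, hm, h1, h2, h3]
theorem join_nil_eq_flatten (parts : List (List Char)) :
    PySem.Chars.join [] parts = parts.flatten := by
  induction parts with
  | nil => simp [PySem.Chars.join_nil]
  | cons p rest ih =>
    cases rest with
    | nil => simp [PySem.Chars.join_singleton]
    | cons q r => rw [PySem.Chars.join_cons_cons, ih]; simp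

theorem main_lemma (l : List Int) :
    Pre_to_rle_string l →
    PySem.Chars.join []
        (((PySem.List.pyRange 0 (l.length : Int) 1).flatMap (pvGA l)).map String.toList) =
      PySem.Chars.join [':'] ((pvChunks l).map String.toList) := by
  induction l using pvChunks.induct with
  | case1 =>
    intro _
    simp [pvChunks, PySem.Chars.join_nil,
      show PySem.List.pyRange 0 0 1 = [] from by decide]
  | case2 n =>
    intro _
    simp [pvChunks, pvGA, PySem.Chars.join_singleton,
      show PySem.List.pyRange 0 1 1 = [(0 : Int)] from by decide,
      show PySem.List.pyGetD [n] 0 0 = n from rfl]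
  | case3 n v rest ih =>
    intro hp
    have hpre : Pre_to_rle_string rest := by
      intro i h hi
      have := hp (i + 2) (by simp [List.length_cons]; omega) (by omega)
      simpa [List.getElem_cons_succ] using this
    have hlen : (((n :: v :: rest).length : Nat) : Int) = ((2 + rest.length : Nat) : Int) := by
      push_cast [List.length_cons]; omega
    rw [hlen, PySem.List.pyRange_zero_natCast, List.range_add]
    rw [show List.range 2 = [0, 1] from by decide]
    simp only [List.map_append, List.map_cons, List.map_nil, List.flatMap_append,
      List.flatMap_cons, List.flatMap_nil, List.map_map, List.flatMap_map]
    rw [join_nil_eq_flatten]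
    rw [show (fun a => pvGA (n :: v :: rest) (((fun k : Nat => (k : Int)) ∘ fun x : Nat => 2 + x) a)) =
        fun a : Nat => pvGA rest ((a : Nat) : Int) from funext fun k => pvGA_shift n v rest k]
    cases rest with
    | nil =>
      simp [pvGA, pvChunks, pvChunk, PySem.Chars.join_singleton,
        show PySem.List.pyGetD [n, v] 0 0 = n from rfl,
        show PySem.List.pyGetD [n, v] 1 0 = v from rfl]
      split_ifs <;> simp
    | cons r rs =>
      have hget0 : PySem.List.pyGetD (n :: v :: r :: rs) 0 0 = n := by
        have h : (0:Int) ≤ (rs.length : Int) + 1 + 1 := by positivity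
        simp [PySem.List.pyGetD, PySem.List.pyGet?, PySem.List.pyIdx?, h]
      have hget1 : PySem.List.pyGetD (n :: v :: r :: rs) 1 0 = v := by
        have h : (0:Int) ≤ (rs.length : Int) + 1 := by positivity
        simp [PySem.List.pyGetD, PySem.List.pyGet?, PySem.List.pyIdx?, h]
      have hne : ((rs.length : Int) + 1) ≠ 0 := by positivity
      have hg0 : pvGA (n :: v :: r :: rs) (((0 : Nat) : Int)) = [PySem.Int.toStr n] := by
        simp [pvGA, hget0]
      have hg1 : pvGA (n :: v :: r :: rs) (((1 : Nat) : Int)) =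
          (if 0 ≤ v ∧ v ≤ 9 then [PySem.Int.toStr v]
           else [String.singleton (Char.ofNat (v + 87).toNat)]) ++ [":"] := by
        simp [pvGA, hget1, hne]
      rw [hg0, hg1]
      have htail : List.flatMap (fun a : Nat => pvGA (r :: rs) ((a : Nat) : Int)) (List.range (r :: rs).length) =
          (PySem.List.pyRange 0 ((r :: rs).length : Int) 1).flatMap (pvGA (r :: rs)) := by
        rw [PySem.List.pyRange_zero_natCast, List.flatMap_map]
      rw [htail]
      have ih' := ih hpre
      rw [join_nil_eq_flatten] at ih'
      obtain ⟨q, qs, hq⟩ : ∃ q qs, pvChunks (r :: rs) = q :: qs := by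
        cases rs with
        | nil => exact ⟨_, _, rfl⟩
        | cons a b => exact ⟨_, _, rfl⟩
      rw [show pvChunks (n :: v :: r :: rs) = pvChunk n v :: pvChunks (r :: rs) from rfl, hq]
      rw [hq] at ih'
      simp only [List.map_cons, PySem.Chars.join_cons_cons, List.map_append, List.map_nil,
        List.flatten_append, List.flatten_cons, List.flatten_nil, List.append_nil]
      rw [ih']
      simp only [pvChunk, String.toList_append, apply_ite String.toList,
        show (":" : String).toList = [':'] from rfl, List.append_assoc, List.map_cons]
      split_ifs <;> simp
-- ===== VERDICT (by name: the statement is the Claim_ definition above) =====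
theorem to_rle_string_spec : Claim_equal_to_rle_string := by
  intro l _ hp
  unfold Spec_to_rle_string to_rle_string_alt
  rw [A_eq_join]
  rw [← String.toList_inj, PySem.Str.toList_join, PySem.Str.toList_join]
  exact main_lemma l hp
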